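-- pv_equiv track=rewrite | github.com/Sopraz/Work | AlgroProg_Exercices Dauphine.py | coupei
-- ===== SOURCE A (Python) =====
-- def coupei(S):
--     g = len(S)
--     min = sum(S[:])
--     s = 0
--     while g!=0:
--         for i in range(0,g):
--             s+= S[i]
--         if s<min:
--             min = s
--         s = 0
--         g-=1
--     return min
-- ===== SOURCE B (Python) =====
-- def coupei(S):
--     best = sum(S)
--     s = 0
--     for x in S:
--         s += x
--         best = min(best, s)
--     return best
-- ===== Notes on version B (the rewrite author's own statement) =====
-- stated objective: faster
-- what changed: Replaced the quadratic re-summation of every prefix (a while loop recomputing sum(S[:g]) from scratch for each g) by a single pass that maintains a running prefix sum and its minimum.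
import Mathlib
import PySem

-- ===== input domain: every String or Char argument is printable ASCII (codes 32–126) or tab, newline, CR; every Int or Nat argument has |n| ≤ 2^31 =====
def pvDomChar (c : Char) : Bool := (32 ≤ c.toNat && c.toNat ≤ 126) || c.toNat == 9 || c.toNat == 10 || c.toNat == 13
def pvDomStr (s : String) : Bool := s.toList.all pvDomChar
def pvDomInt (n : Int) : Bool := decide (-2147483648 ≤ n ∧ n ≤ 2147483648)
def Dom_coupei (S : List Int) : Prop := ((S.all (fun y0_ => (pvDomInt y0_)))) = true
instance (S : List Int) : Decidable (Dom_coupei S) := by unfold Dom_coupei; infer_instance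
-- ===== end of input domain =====

-- B replaces A's quadratic per-length re-summation by one pass with a running prefix sum (objective: faster, asymptotic).

-- ===== PORT A =====
-- the 'while g != 0' loop, recursing on g (g counts down to 0); state: the current minimum m
-- inner 'for i in range(0, g): s += S[i]' is the foldl over pyRange (s reset to 0 each round)
def coupeiLoopA (S : List Int) : Nat → Int → Int
  | 0, m => m
  | Nat.succ g', m =>
      let s := (PySem.List.pyRange 0 ((g' : Int) + 1) 1).foldl
                 (fun s i => s + PySem.List.pyGetD S i 0) 0
      coupeiLoopA S g' (if s < m then s else m)

def coupei (S : List Int) : Int :=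
  let g := S.length
  let m := (PySem.List.slice S none none).sum   -- min = sum(S[:])
  coupeiLoopA S g m

-- ===== PORT B =====
-- single pass: state (running prefix sum s, best); best initialised to sum(S)
def coupei_alt (S : List Int) : Int :=
  (S.foldl (fun (p : Int × Int) x => let s := p.1 + x; (s, min p.2 s)) (0, S.sum)).2

-- ===== PRECONDITION & SPEC =====
def Spec_coupei (S : List Int) (out : Int) : Prop := out = coupei_alt S
instance (S : List Int) (out : Int) : Decidable (Spec_coupei S out) := by unfold Spec_coupei; infer_instance

-- ===== CLAIM (what is proved, stated in full; the proofs are below) =====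
def Claim_equal_coupei : Prop := ∀ (S : List Int), Dom_coupei S → Spec_coupei S (coupei S)

-- ===== LEMMAS AND PROOFS =====

-- moving an element through a foldl of min
theorem foldl_min_push (l : List Int) : ∀ (m a : Int),
    l.foldl min (min m a) = min (l.foldl min m) a := by
  induction l with
  | nil => intro m a; simp
  | cons b t ih =>
      intro m a
      simp only [List.foldl_cons]
      rw [min_right_comm m a b, ih]

-- the inner for-loop sums the first g elements
theorem coupei_inner_sum (S : List Int) (g : Nat) (hg : g ≤ S.length) :
    (PySem.List.pyRange 0 ((g : Int)) 1).foldl (fun s i => s + PySem.List.pyGetD S i 0) 0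
      = (S.take g).sum := by
  rw [PySem.List.pyRange_one]
  simp only [sub_zero, Int.toNat_natCast, List.foldl_map, zero_add, PySem.List.pyGetD_natCast]
  induction g with
  | zero => simp
  | succ n ih =>
      rw [List.range_succ, List.foldl_append]
      rw [ih (Nat.le_of_succ_le hg)]
      have hn : n < S.length := hg
      rw [List.take_add_one, List.sum_append]
      simp [List.getElem?_eq_getElem hn, List.getD]

-- A's outer loop computes the foldl of min over prefix sums of lengths 1..g
theorem loopA_eq (S : List Int) : ∀ (g : Nat), g ≤ S.length → ∀ (m : Int),
    coupeiLoopA S g m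
      = ((List.range g).map (fun k => (S.take (k + 1)).sum)).foldl min m := by
  intro g
  induction g with
  | zero => intro _ m; simp [coupeiLoopA]
  | succ n ih =>
      intro hg m
      simp only [coupeiLoopA]
      have : ((n : Int) + 1) = ((n + 1 : Nat) : Int) := by push_cast; ring
      rw [this, coupei_inner_sum S (n + 1) hg]
      rw [ih (Nat.le_of_succ_le hg)]
      have hmin : (if (S.take (n + 1)).sum < m then (S.take (n + 1)).sum else m)
          = min m ((S.take (n + 1)).sum) := by
        rcases lt_or_ge ((S.take (n + 1)).sum) m with h | h
        · simp [h, min_eq_right (le_of_lt h)]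
        · simp [not_lt.mpr h, min_eq_left h]
      rw [hmin, foldl_min_push, List.range_succ, List.map_append, List.foldl_append]
      simp

-- B's fold, generalised over the starting prefix sum s
theorem altFold_eq (L : List Int) : ∀ (s m : Int),
    (L.foldl (fun (p : Int × Int) x => let s := p.1 + x; (s, min p.2 s)) (s, m)).2
      = ((List.range L.length).map (fun k => s + (L.take (k + 1)).sum)).foldl min m := by
  induction L with
  | nil => intro s m; simp
  | cons x t ih =>
      intro s m
      simp only [List.foldl_cons]
      rw [ih (s + x) (min m (s + x))]
      rw [List.length_cons, List.range_succ_eq_map, List.map_cons, List.foldl_cons,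
          List.map_map]
      congr 1
      · simp
      · simp [Function.comp, add_assoc]

-- ===== VERDICT (by name: the statement is the Claim_ definition above) =====
theorem coupei_spec : Claim_equal_coupei := by
  intro S _
  unfold Spec_coupei coupei coupei_alt
  rw [PySem.List.slice_none_none, loopA_eq S S.length le_rfl, altFold_eq S 0 S.sum]
  simp
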